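-- pv_equiv track=rewrite | github.com/Luk-kar/eu-citizens-initiatives-tracker | ECI_initiatives/extractor/responses/parser/extractors/structural.py | _clean_leading_articles
-- ===== SOURCE A (Python) =====
-- from typing import Optional, Dict, List, Union
--
-- def _clean_leading_articles(items: List[str]) -> List[str]:
--     """Remove leading articles from each item ('The', 'the', 'A', 'a', etc.)"""
--     cleaned = []
--     articles = ("The ", "the ", "A ", "a ", "An ", "an ")
--
--     for item in items:
--         cleaned_item = item
--         for article in articles:
--             if cleaned_item.startswith(article):
--                 cleaned_item = cleaned_item[len(article) :]
--                 break
--         if cleaned_item: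
--             cleaned.append(cleaned_item)
--
--     return cleaned
-- ===== SOURCE B (Python) =====
-- def _clean_leading_articles(items):
--     """Remove leading articles from each item ('The', 'the', 'A', 'a', etc.)"""
--     articles = {"The", "the", "A", "a", "An", "an"}
--
--     def strip(item):
--         first, sep, rest = item.partition(' ')
--         return rest if sep and first in articles else item
--
--     return [c for c in map(strip, items) if c]
-- ===== Notes on version B (the rewrite author's own statement) =====
-- stated objective: simpler
-- what changed: Replaces the inner loop over six 'article + space' prefixes (startswith + slice per candidate) by a single partition at the first space plus one set-membership test on the first word.
import Mathlib
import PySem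

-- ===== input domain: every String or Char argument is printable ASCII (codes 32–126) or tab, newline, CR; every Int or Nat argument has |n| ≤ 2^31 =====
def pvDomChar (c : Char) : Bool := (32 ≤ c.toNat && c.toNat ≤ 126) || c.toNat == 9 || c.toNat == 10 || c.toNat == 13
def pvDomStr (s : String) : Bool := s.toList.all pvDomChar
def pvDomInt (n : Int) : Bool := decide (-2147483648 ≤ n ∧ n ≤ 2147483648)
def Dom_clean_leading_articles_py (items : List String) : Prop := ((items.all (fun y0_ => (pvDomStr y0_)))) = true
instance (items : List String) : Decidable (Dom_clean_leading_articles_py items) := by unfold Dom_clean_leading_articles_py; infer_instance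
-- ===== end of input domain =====

-- B replaces A's inner loop over six "article + space" prefixes by one split at the
-- first space plus a set-membership test on the first word (objective: simpler).

-- ===== PORT A =====
-- the tuple ("The ", "the ", "A ", "a ", "An ", "an ") as lists of code points
def pvArtsA : List (List Char) := ["The ".toList, "the ".toList, "A ".toList, "a ".toList, "An ".toList, "an ".toList]

-- A's inner 'for article in articles: if cleaned_item.startswith(article): slice; break' loop
def pvStripA : List (List Char) → List Char → List Char
  | [], ci => ci
  | a :: rest, ci =>
    if PySem.Chars.startswith ci a then PySem.List.slice ci (some (a.length : Int)) none
    else pvStripA rest ci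

def clean_leading_articles_py (items : List String) : List String :=
  items.foldl (fun cleaned item =>
    let ci := pvStripA pvArtsA item.toList
    if ci ≠ [] then cleaned ++ [String.ofList ci] else cleaned) []

-- ===== PORT B =====
-- the set {"The", "the", "A", "a", "An", "an"}
def pvArtWords : List (List Char) := ["The".toList, "the".toList, "A".toList, "a".toList, "An".toList, "an".toList]

-- item.partition(' ') ported by hand (exact): first = chars before the first ' ',
-- sep is non-empty iff ' ' occurs in item, rest = chars after the first ' '
def pvStripB (item : String) : String :=
  let cs := item.toList
  let first := cs.takeWhile (· ≠ ' ')
  let sepRest := cs.dropWhile (· ≠ ' ')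
  if sepRest ≠ [] ∧ first ∈ pvArtWords then String.ofList sepRest.tail else item

def clean_leading_articles_py_alt (items : List String) : List String :=
  (items.map pvStripB).filter (fun c => c ≠ "")

-- ===== PRECONDITION & SPEC =====
def Spec_clean_leading_articles_py (items : List String) (out : List String) : Prop := out = clean_leading_articles_py_alt items
instance (items : List String) (out : List String) : Decidable (Spec_clean_leading_articles_py items out) := by unfold Spec_clean_leading_articles_py; infer_instance

-- ===== CLAIM (what is proved, stated in full; the proofs are below) =====
def Claim_equal_clean_leading_articles_py : Prop := ∀ (items : List String), Dom_clean_leading_articles_py items → Spec_clean_leading_articles_py items (clean_leading_articles_py items)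

-- ===== LEMMAS AND PROOFS =====

-- a "word ++ space" article is a prefix of "first-word ++ space ++ rest" iff the words agree
theorem pv_prefix_iff (w : List Char) : ∀ (f t : List Char), (' ' : Char) ∉ w → (' ' : Char) ∉ f →
    ((w ++ [' ']) <+: (f ++ ' ' :: t) ↔ w = f) := by
  induction w with
  | nil =>
    intro f t _ hf
    cases f with
    | nil => simp
    | cons c f' =>
      constructor
      · rintro ⟨u, hu⟩
        simp only [List.nil_append, List.cons_append, List.cons.injEq] at hu
        exact absurd (show (' ' : Char) ∈ c :: f' by rw [hu.1]; exact List.mem_cons_self) hf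
      · intro h; exact absurd h (by simp)
  | cons c w' ih =>
    intro f t hw hf
    cases f with
    | nil =>
      constructor
      · rintro ⟨u, hu⟩
        simp only [List.cons_append, List.nil_append, List.cons.injEq] at hu
        exact absurd (show (' ' : Char) ∈ c :: w' by rw [← hu.1]; exact List.mem_cons_self) hw
      · intro h; simp at h
    | cons d f' =>
      have hw' : (' ' : Char) ∉ w' := fun h => hw (List.mem_cons_of_mem _ h)
      have hf' : (' ' : Char) ∉ f' := fun h => hf (List.mem_cons_of_mem _ h)
      simp only [List.cons_append, List.cons_prefix_cons, ih f' t hw' hf', List.cons.injEq]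

-- A's inner loop on an item whose (space-free) first word is f: strip iff f is among the words
theorem pv_stripA_space (ws : List (List Char)) : ∀ (f t : List Char),
    (∀ w ∈ ws, (' ' : Char) ∉ w) → (' ' : Char) ∉ f →
    pvStripA (ws.map (· ++ [' '])) (f ++ ' ' :: t) = if f ∈ ws then t else f ++ ' ' :: t := by
  induction ws with
  | nil => intro f t _ _; simp [pvStripA]
  | cons w ws' ih =>
    intro f t hws hf
    have hw : (' ' : Char) ∉ w := hws w List.mem_cons_self
    have hcond : PySem.Chars.startswith (f ++ ' ' :: t) (w ++ [' ']) = true ↔ w = f :=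
      (PySem.Chars.startswith_iff _ _).trans (pv_prefix_iff w f t hw hf)
    simp only [List.map_cons, pvStripA]
    by_cases hwf : w = f
    · subst hwf
      rw [if_pos (hcond.mpr rfl), if_pos List.mem_cons_self,
          PySem.List.slice_from_natCast]
      simp
    · rw [if_neg (by simp [hcond, hwf]),
          ih f t (fun x hx => hws x (List.mem_cons_of_mem _ hx)) hf]
      have hfw : ¬ f = w := fun h => hwf h.symm
      simp [List.mem_cons, hfw]

-- A's inner loop leaves an item containing no space unchanged
theorem pv_stripA_nospace (ws : List (List Char)) (cs : List Char)
    (hws : ∀ w ∈ ws, (' ' : Char) ∈ w) (hcs : (' ' : Char) ∉ cs) :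
    pvStripA ws cs = cs := by
  induction ws with
  | nil => simp [pvStripA]
  | cons w ws' ih =>
    simp only [pvStripA]
    rw [if_neg, ih (fun x hx => hws x (List.mem_cons_of_mem _ hx))]
    intro hpre
    rw [PySem.Chars.startswith_iff] at hpre
    exact hcs (hpre.subset (hws w List.mem_cons_self))

theorem pv_arts_eq : pvArtsA = pvArtWords.map (· ++ [' ']) := by decide

-- per item, A's cleaned_item equals B's strip(item)
theorem pv_strip_eq (s : String) : String.ofList (pvStripA pvArtsA s.toList) = pvStripB s := by
  unfold pvStripB
  by_cases hsp : (' ' : Char) ∈ s.toList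
  · have hne : s.toList.dropWhile (· ≠ ' ') ≠ [] := by
      intro h
      have := List.dropWhile_eq_nil_iff.mp h _ hsp
      simp at this
    obtain ⟨x, t, hxt⟩ := List.exists_cons_of_ne_nil hne
    have hx : x = ' ' := by
      have h1 := List.head_dropWhile_not (p := fun c => (c ≠ ' ' : Bool)) hne
      have h2 : (s.toList.dropWhile (· ≠ ' ')).head? = some x := by rw [hxt]; rfl
      rw [List.head?_eq_some_head hne] at h2
      have h3 := Option.some.inj h2
      rw [h3] at h1
      simpa using h1
    subst hx
    have hf : (' ' : Char) ∉ s.toList.takeWhile (· ≠ ' ') := by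
      intro h
      have := List.mem_takeWhile_imp h
      simp at this
    have hs : s.toList = s.toList.takeWhile (· ≠ ' ') ++ ' ' :: t := by
      conv_lhs => rw [← List.takeWhile_append_dropWhile (p := (· ≠ ' ')) (l := s.toList)]
      rw [hxt]
    rw [pv_arts_eq]
    conv_lhs => rw [hs, pv_stripA_space pvArtWords _ t (by decide) hf]
    by_cases hmem : s.toList.takeWhile (· ≠ ' ') ∈ pvArtWords
    · rw [if_pos hmem, if_pos ⟨hne, hmem⟩, hxt, List.tail_cons]
    · rw [if_neg hmem, if_neg (fun hc => hmem hc.2), ← hs, String.ofList_toList]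
  · have hA : pvStripA pvArtsA s.toList = s.toList :=
      pv_stripA_nospace pvArtsA s.toList (by decide) hsp
    have hdw : s.toList.dropWhile (· ≠ ' ') = [] :=
      List.dropWhile_eq_nil_iff.mpr (fun x hx => by
        simp only [decide_eq_true_eq]
        exact fun h => hsp (h ▸ hx))
    rw [hA, if_neg (fun hc => hc.1 hdw), String.ofList_toList]

-- the append-if fold of A produces B's filtered map
theorem pv_fold (items : List String) : ∀ (acc : List String),
    items.foldl (fun cleaned item =>
      let ci := pvStripA pvArtsA item.toList
      if ci ≠ [] then cleaned ++ [String.ofList ci] else cleaned) acc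
    = acc ++ (items.map pvStripB).filter (fun c => c ≠ "") := by
  induction items with
  | nil => intro acc; simp
  | cons item rest ih =>
    intro acc
    rw [List.foldl_cons, ih]
    simp only [List.map_cons, List.filter_cons]
    by_cases h : pvStripA pvArtsA item.toList = []
    · have hb : pvStripB item = "" := by rw [← pv_strip_eq, h]
      simp [h, hb]
    · simp [h, ← pv_strip_eq]

-- ===== VERDICT (by name: the statement is the Claim_ definition above) =====
theorem clean_leading_articles_py_spec : Claim_equal_clean_leading_articles_py := by
  intro items _
  unfold Spec_clean_leading_articles_py clean_leading_articles_py clean_leading_articles_py_alt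
  simpa using pv_fold items []
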